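-- pv_equiv track=rewrite | github.com/xDSUP/6_password_strength | password_strength.py | check_password_numbers
-- ===== SOURCE A (Python) =====
-- def check_password_numbers(password):
--     if not password.isdigit():
--         numbers = 0
--         for char in password:
--             if char.isdigit():
--                 numbers += 1
--         if numbers >= 4:
--             return 2
--         else:
--             return 1
--     else:
--         return 0
-- ===== SOURCE B (Python) =====
-- def check_password_numbers(password):
--     # Single short-circuit scan: return 2 as soon as the outcome is decided
--     # (a non-digit has been seen and 4 digits counted); the tail cases fall
--     # out of the final state of the scan.
--     digits = 0
--     seen_other = False
--     for ch in password:
--         if ch.isdigit():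
--             digits += 1
--         else:
--             seen_other = True
--         if seen_other and digits >= 4:
--             return 2
--     if password and not seen_other:
--         return 0
--     return 1
-- ===== Notes on version B (the rewrite author's own statement) =====
-- stated objective: alternative
-- what changed: Replaces A's two staged passes (whole-string isdigit() pre-check, then a full counting loop) by one short-circuiting state-machine scan that returns 2 as soon as a non-digit and four digits have been seen, deciding the 0/1 tiers from the final scan state.
import Mathlib
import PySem

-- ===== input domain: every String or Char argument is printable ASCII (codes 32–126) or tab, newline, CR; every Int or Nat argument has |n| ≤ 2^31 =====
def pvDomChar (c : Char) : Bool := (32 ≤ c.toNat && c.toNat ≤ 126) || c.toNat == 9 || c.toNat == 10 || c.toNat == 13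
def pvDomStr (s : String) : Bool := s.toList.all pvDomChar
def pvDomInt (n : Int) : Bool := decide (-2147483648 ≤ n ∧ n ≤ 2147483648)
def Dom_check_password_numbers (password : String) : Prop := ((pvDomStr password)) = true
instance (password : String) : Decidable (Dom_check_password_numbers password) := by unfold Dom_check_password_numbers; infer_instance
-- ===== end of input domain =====

-- B replaces A's two staged passes by one short-circuiting state-machine scan (alternative decomposition, same cost).


-- ===== PORT A =====
-- Literal port of A: whole-string isdigit pre-check, then an explicit counting loop.
def check_password_numbers (password : String) : Int :=
  if ¬ (PySem.Str.strIsdigit password = true) then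
    let numbers := password.toList.foldl
      (fun n c => if PySem.Chars.isdigit c then n + 1 else n) (0 : Int)
    if numbers ≥ 4 then 2 else 1
  else 0

-- ===== PORT B =====
-- Port of B's scan: early return 2 inside the loop, tail cases from the final state.
def check_password_numbers_loop (nonempty : Bool) : List Char → Int → Bool → Int
  | [], _, seen_other => if nonempty && !seen_other then 0 else 1
  | ch :: rest, digits, seen_other =>
      let digits := if PySem.Chars.isdigit ch then digits + 1 else digits
      let seen_other := if PySem.Chars.isdigit ch then seen_other else true
      if seen_other && digits ≥ 4 then 2
      else check_password_numbers_loop nonempty rest digits seen_other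

def check_password_numbers_alt (password : String) : Int :=
  check_password_numbers_loop (password.toList ≠ []) password.toList 0 false

-- ===== PRECONDITION & SPEC =====
def Spec_check_password_numbers (password : String) (out : Int) : Prop := out = check_password_numbers_alt password
instance (password : String) (out : Int) : Decidable (Spec_check_password_numbers password out) := by unfold Spec_check_password_numbers; infer_instance

-- ===== CLAIM (what is proved, stated in full; the proofs are below) =====
def Claim_equal_check_password_numbers : Prop := ∀ (password : String), Dom_check_password_numbers password → Spec_check_password_numbers password (check_password_numbers password)

-- ===== LEMMAS AND PROOFS =====

-- Characterisation of the scan: early exit with 2 happens iff the final state has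
-- a non-digit seen and ≥ 4 digits, since both components are monotone along the scan.
theorem pv_loop_char (b : Bool) (l : List Char) (d : Int) (s : Bool)
    (hs : s = true → d < 4) :
    check_password_numbers_loop b l d s =
      if (s = true ∨ ¬ l.all (fun c => PySem.Chars.isdigit c))
          ∧ d + (l.filter (fun c => PySem.Chars.isdigit c)).length ≥ 4 then 2
      else if b = true ∧ s = false ∧ l.all (fun c => PySem.Chars.isdigit c) then 0
      else 1 := by
  induction l generalizing d s with
  | nil =>
    cases b <;> cases s <;> simp_all [check_password_numbers_loop]
  | cons c t ih =>
    simp only [check_password_numbers_loop, List.all_cons, List.filter_cons]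
    by_cases hc : PySem.Chars.isdigit c
    · simp only [hc, if_true, Bool.true_and]
      by_cases he : (s && decide (d + 1 ≥ 4)) = true
      · obtain ⟨hs1, hd⟩ := Bool.and_eq_true_iff.mp he
        have hd' : d + 1 ≥ 4 := of_decide_eq_true hd
        rw [if_pos he, if_pos]
        refine ⟨Or.inl hs1, ?_⟩
        simp only [List.length_cons]
        push_cast
        omega
      · have hinv : s = true → d + 1 < 4 := by
          intro hs1
          by_contra hge
          exact he (Bool.and_eq_true_iff.mpr ⟨hs1, decide_eq_true (by omega)⟩)
        rw [if_neg he, ih _ _ hinv, List.length_cons]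
        have harith : d + ((((t.filter (fun c => PySem.Chars.isdigit c)).length : Int)) + 1)
            = (d + 1) + ((t.filter (fun c => PySem.Chars.isdigit c)).length : Int) := by ring
        push_cast
        rw [harith]
    · have hd4 : s = false ∨ d < 4 := by
        cases s with
        | false => exact Or.inl rfl
        | true => exact Or.inr (hs rfl)
      simp only [hc, Bool.false_and]
      by_cases he : (decide (d ≥ 4)) = true
      · have hd' : d ≥ 4 := of_decide_eq_true he
        rw [if_pos (by simpa using he), if_pos]
        refine ⟨Or.inr (by simp), ?_⟩
        omega
      · have hd' : ¬ d ≥ 4 := by simpa using he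
        rw [if_neg (by simpa using he)]
        simp only [Bool.false_eq_true, if_false, not_false_iff, or_true, true_and,
          and_false]
        rw [ih d true (fun _ => by omega)]
        simp

theorem pv_foldl_count (l : List Char) (a : Int) :
    l.foldl (fun n c => if PySem.Chars.isdigit c then n + 1 else n) a
      = a + (l.filter (fun c => PySem.Chars.isdigit c)).length := by
  induction l generalizing a with
  | nil => simp
  | cons c t ih =>
    simp only [List.foldl_cons, List.filter_cons]
    by_cases h : PySem.Chars.isdigit c
    · simp [h, ih]; omega
    · simp [h, ih]

-- ===== VERDICT (by name: the statement is the Claim_ definition above) =====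
theorem check_password_numbers_spec : Claim_equal_check_password_numbers := by
  intro password _
  unfold Spec_check_password_numbers check_password_numbers check_password_numbers_alt
  rw [pv_loop_char _ _ _ _ (by simp), pv_foldl_count]
  simp only [PySem.Str.strIsdigit_eq, PySem.Chars.strIsdigit, zero_add]
  rcases h : password.toList with _ | ⟨c, t⟩
  · simp
  · by_cases hall : (c :: t).all (fun x => PySem.Chars.isdigit x)
    · have hf : ((c :: t).filter (fun x => PySem.Chars.isdigit x)) = c :: t := by
        rw [List.filter_eq_self]; simpa [List.all_eq_true] using hall
      simp [hall, hf]
    · simp only [hall, or_true, true_and, Bool.not_eq_true] at *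
      split_ifs with h1 h2 <;> simp_all
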